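-- pv_equiv track=rewrite | github.com/devSayan619/dsa__push-daily-for-streak | CONTEST/codevita/d.py | buzz_day_sale
-- ===== SOURCE A (Python) =====
-- def buzz_day_sale(N, ids, costs, A):
--     # Create a mapping of item IDs to their costs
--     item_cost_map = {ids[i]: costs[i] for i in range(N)}
--
--     # To hold the free items information
--     free_items_info = {}
--
--     # Calculate free items for each ID
--     for i in range(N):
--         current_id = ids[i]
--         free_items = []
--         for j in range(N):
--             if current_id % ids[j] == 0 and ids[j] != current_id:
--                 free_items.append(ids[j])
--         free_items_info[current_id] = free_items
--
--     max_free_count = 0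
--     max_free_worth = 0
--
--     # Check each item to see how many free items can be obtained
--     for i in range(N):
--         current_id = ids[i]
--         current_cost = costs[i]
--
--         # Check how many can be bought with the budget A
--         if current_cost <= A:
--             # Maximum quantity Veda can buy of this item
--             max_quantity = A // current_cost
--
--             # Count free items and their total worth
--             total_free_items = max_quantity * len(free_items_info[current_id])
--             total_free_worth = sum(item_cost_map[free_id] * max_quantity for free_id in free_items_info[current_id])
--
--             # Update max counts and worth
--             if (total_free_items > max_free_count or
--                 (total_free_items == max_free_count and total_free_worth > max_free_worth)):
--                 max_free_count = total_free_items
--                 max_free_worth = total_free_worth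
--
--     return max_free_count, max_free_worth
-- ===== SOURCE B (Python) =====
-- def buzz_day_sale(N, ids, costs, A):
--     # One grouping pass: multiplicity and last-seen cost per distinct id.
--     mult = {}
--     last = {}
--     for i in range(N):
--         v = ids[i]
--         mult[v] = mult.get(v, 0) + 1
--         last[v] = costs[i]
--     # For each distinct id, enumerate its divisors by trial division up to sqrt(|u|)
--     # instead of scanning the item list: total count/worth of free items per id.
--     free = {}
--     for u in mult:
--         cnt = 0
--         worth = 0
--         m = -u if u < 0 else u
--         d = 1
--         while d * d <= m:
--             if m % d == 0:
--                 for e in ([d] if d * d == m else [d, m // d]):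
--                     for s in (e, -e):
--                         if s != u and s in mult:
--                             cnt += mult[s]
--                             worth += mult[s] * last[s]
--             d += 1
--         free[u] = (cnt, worth)
--     best = (0, 0)
--     for i in range(N):
--         if costs[i] <= A:
--             q = A // costs[i]
--             cnt, worth = free.get(ids[i], (0, 0))
--             cand = (q * cnt, q * worth)
--             if cand > best:
--                 best = cand
--     return best
-- ===== Notes on version B (the rewrite author's own statement) =====
-- stated objective: alternative
-- what changed: Instead of A's quadratic per-item scan over all items to collect each id's free items, B groups the items once into multiplicity/last-cost maps and computes each DISTINCT id's free count and worth by enumerating that id's divisors via trial division up to sqrt(|id|) and probing the map for +/- each divisor, storing the result per distinct id.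
import Mathlib
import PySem

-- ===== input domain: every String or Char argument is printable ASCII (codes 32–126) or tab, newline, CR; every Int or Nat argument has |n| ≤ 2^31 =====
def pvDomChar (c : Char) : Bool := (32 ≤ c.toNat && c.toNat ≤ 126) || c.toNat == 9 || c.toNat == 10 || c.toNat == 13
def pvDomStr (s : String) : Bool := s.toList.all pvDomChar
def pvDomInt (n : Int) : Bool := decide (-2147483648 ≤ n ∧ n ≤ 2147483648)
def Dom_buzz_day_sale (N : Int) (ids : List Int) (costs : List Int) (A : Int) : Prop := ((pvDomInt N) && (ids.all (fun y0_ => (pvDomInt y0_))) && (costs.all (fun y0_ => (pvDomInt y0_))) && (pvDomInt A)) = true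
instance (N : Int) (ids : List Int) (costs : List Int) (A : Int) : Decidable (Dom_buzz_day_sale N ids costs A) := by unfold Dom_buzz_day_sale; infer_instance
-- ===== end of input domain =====

-- B replaces A's quadratic per-item scan with a grouping pass (multiplicity and last cost per
-- distinct id) and computes each distinct id's free count/worth by enumerating its divisors via
-- trial division up to sqrt(|id|), probing the map for ± each divisor ('alternative').

-- ===== PORT A =====
def buzz_day_sale (N : Int) (ids : List Int) (costs : List Int) (A : Int) : Int × Int :=
  let itemCostMap : PySem.Dict Int Int :=
    (PySem.List.pyRange 0 N).foldl
      (fun d i => d.insert (PySem.List.pyGetD ids i 0) (PySem.List.pyGetD costs i 0))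
      PySem.Dict.empty
  let freeItemsInfo : PySem.Dict Int (List Int) :=
    (PySem.List.pyRange 0 N).foldl
      (fun d i =>
        let currentId := PySem.List.pyGetD ids i 0
        let freeItems :=
          (PySem.List.pyRange 0 N).foldl
            (fun acc j =>
              let idj := PySem.List.pyGetD ids j 0
              if PySem.Int.mod currentId idj == 0 && idj != currentId then acc ++ [idj] else acc)
            []
        d.insert currentId freeItems)
      PySem.Dict.empty
  (PySem.List.pyRange 0 N).foldl
    (fun st i =>
      let currentId := PySem.List.pyGetD ids i 0
      let currentCost := PySem.List.pyGetD costs i 0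
      if currentCost ≤ A then
        let maxQuantity := PySem.Int.floordiv A currentCost
        let fl := freeItemsInfo.getD currentId []
        let totalFreeItems := maxQuantity * (fl.length : Int)
        let totalFreeWorth := (fl.map (fun freeId => itemCostMap.getD freeId 0 * maxQuantity)).sum
        if totalFreeItems > st.1 ∨ (totalFreeItems = st.1 ∧ totalFreeWorth > st.2) then
          (totalFreeItems, totalFreeWorth)
        else st
      else st)
    (0, 0)

-- ===== PORT B =====
-- inner body of B's pair-probing loop: 'if s != u and s in mult: cnt += mult[s]; worth += mult[s]*last[s]'
def pvInner (mult last : PySem.Dict Int Int) (u : Int) (cw : Int × Int) (s : Int) : Int × Int :=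
  if s != u && mult.contains s then
    (cw.1 + mult.getD s 0, cw.2 + mult.getD s 0 * last.getD s 0)
  else cw

-- B's 'while d * d <= m' trial-division loop
def pvDivLoop (mult last : PySem.Dict Int Int) (u m d : Int) (cw : Int × Int) : Int × Int :=
  if h : d * d ≤ m then
    pvDivLoop mult last u m (d + 1)
      (if PySem.Int.mod m d == 0 then
        (if d * d == m then [d] else [d, PySem.Int.floordiv m d]).foldl
          (fun cw e => [e, -e].foldl (pvInner mult last u) cw) cw
      else cw)
  else cw
termination_by (m + 1 - d).toNat
decreasing_by
  have h2 : 0 ≤ (d - 1) * d := by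
    by_cases h0 : d ≤ 0
    · nlinarith
    · nlinarith
  have h3 : d ≤ m := by nlinarith
  omega

def buzz_day_sale_alt (N : Int) (ids : List Int) (costs : List Int) (A : Int) : Int × Int :=
  let maps :=
    (PySem.List.pyRange 0 N).foldl
      (fun (st : PySem.Dict Int Int × PySem.Dict Int Int) i =>
        let v := PySem.List.pyGetD ids i 0
        (st.1.insert v (st.1.getD v 0 + 1), st.2.insert v (PySem.List.pyGetD costs i 0)))
      (PySem.Dict.empty, PySem.Dict.empty)
  let mult := maps.1
  let last := maps.2
  let free : PySem.Dict Int (Int × Int) :=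
    mult.keys.foldl
      (fun f u => f.insert u (pvDivLoop mult last u (if u < 0 then -u else u) 1 (0, 0)))
      PySem.Dict.empty
  (PySem.List.pyRange 0 N).foldl
    (fun best i =>
      if PySem.List.pyGetD costs i 0 ≤ A then
        let q := PySem.Int.floordiv A (PySem.List.pyGetD costs i 0)
        let cw := free.getD (PySem.List.pyGetD ids i 0) (0, 0)
        if q * cw.1 > best.1 ∨ (q * cw.1 = best.1 ∧ q * cw.2 > best.2) then (q * cw.1, q * cw.2)
        else best
      else best)
    (0, 0)

-- ===== PRECONDITION & SPEC =====
-- Pre_ excludes exactly the inputs where the Python A raises: an index bound N beyond either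
-- list (IndexError), a zero id among the first N (ZeroDivisionError in the divisibility scan),
-- and, when the budget is nonnegative, a zero cost among the first N (ZeroDivisionError in A // cost).
def Pre_buzz_day_sale (N : Int) (ids : List Int) (costs : List Int) (A : Int) : Prop :=
  N ≤ (ids.length : Int) ∧ N ≤ (costs.length : Int) ∧
  (∀ x ∈ ids.take N.toNat, x ≠ 0) ∧ (0 ≤ A → ∀ c ∈ costs.take N.toNat, c ≠ 0)
instance (N : Int) (ids : List Int) (costs : List Int) (A : Int) : Decidable (Pre_buzz_day_sale N ids costs A) := by unfold Pre_buzz_day_sale; infer_instance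
def pvWitness_buzz_day_sale : Int × List Int × List Int × Int := (2, [2, 4], [3, 5], 10)

def Spec_buzz_day_sale (N : Int) (ids : List Int) (costs : List Int) (A : Int) (out : Int × Int) : Prop := out = buzz_day_sale_alt N ids costs A
instance (N : Int) (ids : List Int) (costs : List Int) (A : Int) (out : Int × Int) : Decidable (Spec_buzz_day_sale N ids costs A out) := by unfold Spec_buzz_day_sale; infer_instance

-- ===== CLAIM (what is proved, stated in full; the proofs are below) =====
def Claim_equal_buzz_day_sale : Prop := ∀ (N : Int) (ids : List Int) (costs : List Int) (A : Int), Dom_buzz_day_sale N ids costs A → Pre_buzz_day_sale N ids costs A → Spec_buzz_day_sale N ids costs A (buzz_day_sale N ids costs A)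


-- ===== LEMMAS AND PROOFS =====

-- A loop 'for i in range(N)' reading ids[i] and costs[i] is a fold over the zipped length-N prefixes.
theorem pv_aux {b : Type} (ids costs : List Int) (f : b -> Int -> Int -> b) :
    forall (n : Nat), n <= ids.length -> n <= costs.length -> forall (init : b),
    (List.range n).foldl (fun acc k => f acc (ids.getD k 0) (costs.getD k 0)) init
      = ((ids.take n).zip (costs.take n)).foldl (fun acc p => f acc p.1 p.2) init := by
  intro n
  induction n with
  | zero => intro _ _ init; simp
  | succ m ih =>
    intro hm1 hm2 init
    rw [List.range_succ, List.foldl_append, ih (by omega) (by omega)]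
    rw [List.take_add_one, List.take_add_one]
    have hi : ids[m]? = some ids[m] := List.getElem?_eq_getElem (by omega)
    have hc : costs[m]? = some costs[m] := List.getElem?_eq_getElem (by omega)
    rw [hi, hc]
    rw [List.zip_append (by simp; omega), List.foldl_append]
    simp [List.getD, hi, hc]

theorem pv_foldl_range_zip {b : Type} (ids costs : List Int) (N : Int)
    (h1 : N <= (ids.length : Int)) (h2 : N <= (costs.length : Int))
    (f : b -> Int -> Int -> b) (init : b) :
    (PySem.List.pyRange 0 N).foldl
        (fun acc j => f acc (PySem.List.pyGetD ids j 0) (PySem.List.pyGetD costs j 0)) init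
      = ((ids.take N.toNat).zip (costs.take N.toNat)).foldl (fun acc p => f acc p.1 p.2) init := by
  by_cases hN : N <= 0
  . have hr : PySem.List.pyRange 0 N = [] := by simp [PySem.List.pyRange]; omega
    have ht : N.toNat = 0 := by omega
    simp [hr, ht]
  . have hn : (N.toNat : Int) = N := Int.toNat_of_nonneg (by omega)
    rw [<- hn, PySem.List.pyRange_zero_natCast, List.foldl_map]
    simp only [PySem.List.pyGetD_natCast]
    exact pv_aux ids costs f N.toNat (by omega) (by omega) init

-- Lookup in a dict built by inserting a key-determined value for every pair of the list.
theorem pv_getD_foldl_insert_val {v' : Type} (v : Int -> v') (zs : List (Int × Int)) (u : Int) (dflt : v') :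
    ((zs.foldl (fun d p => d.insert p.1 (v p.1)) PySem.Dict.empty).getD u dflt)
      = if u ∈ zs.map Prod.fst then v u else dflt := by
  induction zs using List.reverseRecOn with
  | nil => simp [PySem.Dict.getD_empty]
  | append_singleton l p ih =>
    rw [List.foldl_append, List.foldl_cons, List.foldl_nil, PySem.Dict.getD_insert, ih]
    by_cases h : u = p.1
    . simp [h]
    . have hmem : (u ∈ List.map Prod.fst (l ++ [p])) ↔ (u ∈ List.map Prod.fst l) := by
        simp [List.map_append, h]
      simp only [hmem, if_neg h]

-- Same, keyed directly by a list of keys.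
theorem pv_getD_foldl_insert_key {v' : Type} (v : Int -> v') (ks : List Int) (u : Int) (dflt : v') :
    ((ks.foldl (fun d k => d.insert k (v k)) PySem.Dict.empty).getD u dflt)
      = if u ∈ ks then v u else dflt := by
  induction ks using List.reverseRecOn with
  | nil => simp [PySem.Dict.getD_empty]
  | append_singleton l k ih =>
    rw [List.foldl_append, List.foldl_cons, List.foldl_nil, PySem.Dict.getD_insert, ih]
    by_cases h : u = k
    . simp [h]
    . have hmem : (u ∈ l ++ [k]) ↔ (u ∈ l) := by simp [h]
      simp only [hmem, if_neg h]

-- Summing g over a filtered list equals summing count-weighted g over the filtered distinct elements.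
theorem pv_sum_filter_group (xs : List Int) (P : Int -> Bool) (g : Int -> Int) :
    ((xs.filter P).map g).sum
      = (((PySem.Set.ofList xs).filter P).map (fun k => (List.count k xs : Int) * g k)).sum := by
  classical
  have hnd : ((PySem.Set.ofList xs).filter P).Nodup := (PySem.Set.nodup_ofList xs).filter _
  have hfin : ((PySem.Set.ofList xs).filter P).toFinset = (xs.filter P).toFinset := by
    ext a
    simp [List.mem_toFinset, PySem.Set.mem_ofList]
  rw [Finset.sum_list_map_count, <- List.sum_toFinset _ hnd, hfin]
  apply Finset.sum_congr rfl
  intro m hm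
  rw [List.mem_toFinset, List.mem_filter] at hm
  rw [List.count_filter hm.2]
  simp

theorem pv_length_filter_group (xs : List Int) (P : Int -> Bool) :
    (((xs.filter P).length : Nat) : Int)
      = (((PySem.Set.ofList xs).filter P).map (fun k => (List.count k xs : Int))).sum := by
  have h := pv_sum_filter_group xs P (fun _ => 1)
  simpa using h

-- The per-candidate free-items count and worth, grouped over the distinct ids.
def pvCnt (xs : List Int) (u : Int) : Int :=
  (((PySem.Set.ofList xs).filter (fun d => PySem.Int.mod u d == 0 && d != u)).map
    (fun k => (List.count k xs : Int))).sum

def pvWorth (xs cs : List Int) (u : Int) : Int :=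
  (((PySem.Set.ofList xs).filter (fun d => PySem.Int.mod u d == 0 && d != u)).map
    (fun k => (List.count k xs : Int) *
      ((xs.zip cs).foldl (fun d p => d.insert p.1 p.2) PySem.Dict.empty).getD k 0)).sum

-- Common normal form of both selection loops.
def pvSel (A : Int) (xs cs : List Int) : Int × Int :=
  (xs.zip cs).foldl (fun st p =>
    if p.2 <= A then
      if PySem.Int.floordiv A p.2 * pvCnt xs p.1 > st.1 ∨
         (PySem.Int.floordiv A p.2 * pvCnt xs p.1 = st.1 ∧
          PySem.Int.floordiv A p.2 * pvWorth xs cs p.1 > st.2) then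
        (PySem.Int.floordiv A p.2 * pvCnt xs p.1, PySem.Int.floordiv A p.2 * pvWorth xs cs p.1)
      else st
    else st) (0, 0)

-- A's selection step, with the two dicts abstracted.
def pvStepA (A : Int) (F : PySem.Dict Int (List Int)) (D : PySem.Dict Int Int)
    (st : Int × Int) (u c : Int) : Int × Int :=
  if c <= A then
    if PySem.Int.floordiv A c * ((F.getD u []).length : Int) > st.1 ∨
       (PySem.Int.floordiv A c * ((F.getD u []).length : Int) = st.1 ∧
        ((F.getD u []).map (fun freeId => D.getD freeId 0 * PySem.Int.floordiv A c)).sum > st.2) then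
      (PySem.Int.floordiv A c * ((F.getD u []).length : Int),
       ((F.getD u []).map (fun freeId => D.getD freeId 0 * PySem.Int.floordiv A c)).sum)
    else st
  else st

theorem pv_selA_congr (A : Int) (xs cs : List Int)
    (F : PySem.Dict Int (List Int)) (D : PySem.Dict Int Int)
    (hF : ∀ u, u ∈ xs → F.getD u [] = xs.filter (fun d => PySem.Int.mod u d == 0 && d != u))
    (hD : D = (xs.zip cs).foldl (fun d p => d.insert p.1 p.2) PySem.Dict.empty) :
    (xs.zip cs).foldl (fun st p => pvStepA A F D st p.1 p.2) (0, 0) = pvSel A xs cs := by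
  unfold pvSel
  refine PySem.List.foldl_congr_mem _ _ _ _ ?_
  intro st p hp
  have hu : p.1 ∈ xs := (List.of_mem_zip (show (p.1, p.2) ∈ xs.zip cs from by simpa using hp)).1
  have hw : ((xs.filter (fun d => PySem.Int.mod p.1 d == 0 && d != p.1)).map
        (fun freeId => ((xs.zip cs).foldl (fun d p => d.insert p.1 p.2) PySem.Dict.empty).getD freeId 0 *
          PySem.Int.floordiv A p.2)).sum
      = PySem.Int.floordiv A p.2 * pvWorth xs cs p.1 := by
    rw [pv_sum_filter_group xs (fun d => PySem.Int.mod p.1 d == 0 && d != p.1)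
        (fun d => ((xs.zip cs).foldl (fun d' p' => d'.insert p'.1 p'.2) PySem.Dict.empty).getD d 0 *
          PySem.Int.floordiv A p.2)]
    unfold pvWorth
    rw [show (fun k => (List.count k xs : Int) *
          (((xs.zip cs).foldl (fun d' p' => d'.insert p'.1 p'.2) PySem.Dict.empty).getD k 0 *
            PySem.Int.floordiv A p.2))
        = (fun k => ((List.count k xs : Int) *
            ((xs.zip cs).foldl (fun d' p' => d'.insert p'.1 p'.2) PySem.Dict.empty).getD k 0) *
          PySem.Int.floordiv A p.2) from funext (fun k => by ring)]
    rw [List.sum_map_mul_right]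
    exact mul_comm _ _
  simp only [pvStepA]
  rw [hF p.1 hu, hD]
  rw [show (((xs.filter (fun d => PySem.Int.mod p.1 d == 0 && d != p.1)).length : Nat) : Int)
        = pvCnt xs p.1 from pv_length_filter_group xs _]
  rw [hw]

set_option maxHeartbeats 2000000 in
theorem pv_A_eq (N : Int) (ids costs : List Int) (A : Int)
    (h1 : N <= (ids.length : Int)) (h2 : N <= (costs.length : Int)) :
    buzz_day_sale N ids costs A = pvSel A (ids.take N.toNat) (costs.take N.toNat) := by
  have hxlen : (ids.take N.toNat).length = N.toNat := by simp; omega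
  have hclen : (costs.take N.toNat).length = N.toNat := by simp; omega
  have hfst : ((ids.take N.toNat).zip (costs.take N.toNat)).map Prod.fst = ids.take N.toNat :=
    List.map_fst_zip (by rw [hxlen, hclen])
  have hinner : ∀ u : Int,
      (PySem.List.pyRange 0 N).foldl
        (fun acc j =>
          if PySem.Int.mod u (PySem.List.pyGetD ids j 0) == 0 && PySem.List.pyGetD ids j 0 != u then
            acc ++ [PySem.List.pyGetD ids j 0]
          else acc) []
      = (ids.take N.toNat).filter (fun d => PySem.Int.mod u d == 0 && d != u) := by
    intro u
    refine Eq.trans (pv_foldl_range_zip ids costs N h1 h2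
      (fun acc d _ => if PySem.Int.mod u d == 0 && d != u then acc ++ [d] else acc) []) ?_
    refine Eq.trans (List.foldl_map (f := Prod.fst)
      (g := fun acc d => if PySem.Int.mod u d == 0 && d != u then acc ++ [d] else acc)).symm ?_
    rw [hfst]
    simpa using PySem.List.foldl_append_if_eq_filter
      (fun d => PySem.Int.mod u d == 0 && d != u) (ids.take N.toNat) []
  have e1 : (PySem.List.pyRange 0 N).foldl
      (fun d i => d.insert (PySem.List.pyGetD ids i 0)
        ((PySem.List.pyRange 0 N).foldl
          (fun acc j =>
            if PySem.Int.mod (PySem.List.pyGetD ids i 0) (PySem.List.pyGetD ids j 0) == 0 &&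
                PySem.List.pyGetD ids j 0 != PySem.List.pyGetD ids i 0 then
              acc ++ [PySem.List.pyGetD ids j 0]
            else acc) []))
      PySem.Dict.empty
      = ((ids.take N.toNat).zip (costs.take N.toNat)).foldl
          (fun d p => d.insert p.1
            ((ids.take N.toNat).filter (fun dd => PySem.Int.mod p.1 dd == 0 && dd != p.1)))
          PySem.Dict.empty := by
    refine Eq.trans (pv_foldl_range_zip ids costs N h1 h2
      (fun d u _ => d.insert u
        ((PySem.List.pyRange 0 N).foldl
          (fun acc j =>
            if PySem.Int.mod u (PySem.List.pyGetD ids j 0) == 0 && PySem.List.pyGetD ids j 0 != u then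
              acc ++ [PySem.List.pyGetD ids j 0]
            else acc) [])) PySem.Dict.empty) ?_
    refine PySem.List.foldl_congr_mem _ _ _ _ ?_
    intro acc x _
    exact congrArg (fun l => PySem.Dict.insert acc x.1 l) (hinner x.1)
  have hfii : ∀ u, u ∈ ids.take N.toNat →
      ((PySem.List.pyRange 0 N).foldl
        (fun d i => d.insert (PySem.List.pyGetD ids i 0)
          ((PySem.List.pyRange 0 N).foldl
            (fun acc j =>
              if PySem.Int.mod (PySem.List.pyGetD ids i 0) (PySem.List.pyGetD ids j 0) == 0 &&
                  PySem.List.pyGetD ids j 0 != PySem.List.pyGetD ids i 0 then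
                acc ++ [PySem.List.pyGetD ids j 0]
              else acc) []))
        PySem.Dict.empty).getD u []
      = (ids.take N.toNat).filter (fun d => PySem.Int.mod u d == 0 && d != u) := by
    intro u hu
    have e3 : (((ids.take N.toNat).zip (costs.take N.toNat)).foldl
          (fun d p => d.insert p.1
            ((ids.take N.toNat).filter (fun dd => PySem.Int.mod p.1 dd == 0 && dd != p.1)))
          PySem.Dict.empty).getD u []
        = if u ∈ ((ids.take N.toNat).zip (costs.take N.toNat)).map Prod.fst then
            (ids.take N.toNat).filter (fun dd => PySem.Int.mod u dd == 0 && dd != u)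
          else [] :=
      pv_getD_foldl_insert_val
        (fun w => (ids.take N.toNat).filter (fun dd => PySem.Int.mod w dd == 0 && dd != w))
        _ u []
    rw [e1, e3, hfst, if_pos hu]
  refine Eq.trans (pv_foldl_range_zip ids costs N h1 h2
    (pvStepA A
      ((PySem.List.pyRange 0 N).foldl
        (fun d i => d.insert (PySem.List.pyGetD ids i 0)
          ((PySem.List.pyRange 0 N).foldl
            (fun acc j =>
              if PySem.Int.mod (PySem.List.pyGetD ids i 0) (PySem.List.pyGetD ids j 0) == 0 &&
                  PySem.List.pyGetD ids j 0 != PySem.List.pyGetD ids i 0 then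
                acc ++ [PySem.List.pyGetD ids j 0]
              else acc) []))
        PySem.Dict.empty)
      ((PySem.List.pyRange 0 N).foldl
        (fun d i => d.insert (PySem.List.pyGetD ids i 0) (PySem.List.pyGetD costs i 0))
        PySem.Dict.empty))
    (0, 0)) ?_
  refine pv_selA_congr A (ids.take N.toNat) (costs.take N.toNat) _ _ hfii ?_
  exact pv_foldl_range_zip ids costs N h1 h2 (fun d u c => d.insert u c) PySem.Dict.empty

-- ========== B-side lemmas ==========

-- The multiset of candidates visited by B's trial-division loop from counter d upward.
def pvVisit (m d : Int) : List Int :=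
  if _h : d * d ≤ m then
    (if PySem.Int.mod m d == 0 then
      (if d * d == m then [d] else [d, PySem.Int.floordiv m d]).flatMap (fun e => [e, -e])
    else []) ++ pvVisit m (d + 1)
  else []
termination_by (m + 1 - d).toNat
decreasing_by
  have h2 : 0 ≤ (d - 1) * d := by
    by_cases h0 : d ≤ 0
    · nlinarith
    · nlinarith
  have h3 : d ≤ m := by nlinarith
  omega

-- B's loop is a fold of pvInner over the visited candidates.
theorem pvDivLoop_eq_foldl (M L : PySem.Dict Int Int) (u m : Int) :
    ∀ (d : Int) (cw : Int × Int),
      pvDivLoop M L u m d cw = (pvVisit m d).foldl (pvInner M L u) cw := by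
  have H : ∀ (k : Nat) (d : Int) (cw : Int × Int), (m + 1 - d).toNat = k →
      pvDivLoop M L u m d cw = (pvVisit m d).foldl (pvInner M L u) cw := by
    intro k
    induction k using Nat.strong_induction_on with
    | _ k ih =>
      intro d cw hk
      rw [pvDivLoop, pvVisit]
      by_cases h : d * d ≤ m
      · rw [dif_pos h, dif_pos h, List.foldl_append]
        have h2 : 0 ≤ (d - 1) * d := by
          by_cases h0 : d ≤ 0
          · nlinarith
          · nlinarith
        have hd : d ≤ m := by nlinarith
        rw [ih ((m + 1 - (d + 1)).toNat) (by omega) (d + 1) _ rfl]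
        congr 1
        by_cases hm : (PySem.Int.mod m d == 0) = true
        · rw [if_pos hm, if_pos hm]
          by_cases h3 : (d * d == m) = true
          · rw [if_pos h3]
            simp [List.flatMap, List.foldl]
          · rw [if_neg h3]
            simp [List.flatMap, List.foldl]
        · rw [if_neg hm, if_neg hm]
          simp
      · rw [dif_neg h, dif_neg h]
        simp
  exact fun d cw => H ((m + 1 - d).toNat) d cw rfl

-- Membership in the visited list: exactly the nonzero divisors s of m with d ≤ |s| and |s|*d ≤ m.
theorem pvVisit_mem (m : Int) :
    ∀ (d : Int), 1 ≤ d → ∀ (s : Int),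
      (s ∈ pvVisit m d ↔ s ≠ 0 ∧ s ∣ m ∧ d ≤ (s.natAbs : Int) ∧ (s.natAbs : Int) * d ≤ m) := by
  have H : ∀ (k : Nat) (d : Int), (m + 1 - d).toNat = k → 1 ≤ d → ∀ (s : Int),
      (s ∈ pvVisit m d ↔ s ≠ 0 ∧ s ∣ m ∧ d ≤ (s.natAbs : Int) ∧ (s.natAbs : Int) * d ≤ m) := by
    intro k
    induction k using Nat.strong_induction_on with
    | _ k ih =>
      intro d hk hd1 s
      rw [pvVisit]
      by_cases h : d * d ≤ m
      · rw [dif_pos h]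
        have hd : d ≤ m := by nlinarith
        have ihs := ih ((m + 1 - (d + 1)).toNat) (by omega) (d + 1) rfl (by omega) s
        rw [List.mem_append, ihs]
        constructor
        · rintro (hH | ⟨hs0, hdvd, hge, hle⟩)
          · by_cases hm : (PySem.Int.mod m d == 0) = true
            · rw [if_pos hm] at hH
              have hdm : d ∣ m := (PySem.Int.mod_eq_zero_iff_dvd m d).1 (by simpa using hm)
              have hq : PySem.Int.floordiv m d * d = m := by
                rw [PySem.Int.floordiv_eq_ediv_of_pos (by omega)]
                exact Int.ediv_mul_cancel hdm
              have hdq : d ≤ PySem.Int.floordiv m d := by nlinarith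
              by_cases h3 : (d * d == m) = true
              · rw [if_pos h3] at hH
                simp [List.flatMap] at hH
                rcases hH with hsd | hsd
                · refine ⟨by omega, hsd ▸ hdm, by omega, ?_⟩
                  have haa : ((Int.natAbs s : Int)) = d := by omega
                  rw [haa]; exact h
                · refine ⟨by omega, hsd ▸ ((Int.neg_dvd).2 hdm), by omega, ?_⟩
                  have haa : ((Int.natAbs s : Int)) = d := by omega
                  rw [haa]; exact h
              · rw [if_neg h3] at hH
                simp [List.flatMap] at hH
                have hqdvd : PySem.Int.floordiv m d ∣ m := Dvd.intro d (by linarith [hq])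
                rcases hH with hsd | hsd | hsd | hsd
                · refine ⟨by omega, hsd ▸ hdm, by omega, ?_⟩
                  have haa : ((Int.natAbs s : Int)) = d := by omega
                  rw [haa]; exact h
                · refine ⟨by omega, hsd ▸ ((Int.neg_dvd).2 hdm), by omega, ?_⟩
                  have haa : ((Int.natAbs s : Int)) = d := by omega
                  rw [haa]; exact h
                · refine ⟨by omega, hsd ▸ hqdvd, by omega, ?_⟩
                  have haa : ((Int.natAbs s : Int)) = PySem.Int.floordiv m d := by omega
                  rw [haa]; linarith [hq]
                · refine ⟨by omega, hsd ▸ ((Int.neg_dvd).2 hqdvd), by omega, ?_⟩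
                  have haa : ((Int.natAbs s : Int)) = PySem.Int.floordiv m d := by omega
                  rw [haa]; linarith [hq]
            · rw [if_neg hm] at hH
              simp at hH
          · have ha0 : 0 ≤ ((Int.natAbs s : Int)) := by omega
            exact ⟨hs0, hdvd, by omega, by nlinarith⟩
        · rintro ⟨hs0, hdvd, hge, hle⟩
          have ha1 : 1 ≤ ((Int.natAbs s : Int)) := by omega
          have hadvd : ((Int.natAbs s : Int)) ∣ m := (Int.natAbs_dvd).2 hdvd
          obtain ⟨kq, hkq⟩ := hadvd
          have hsa := Int.natAbs_eq s
          by_cases hc1 : ((Int.natAbs s : Int)) = d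
          · left
            have hdm : d ∣ m := hc1 ▸ (Int.natAbs_dvd).2 hdvd
            rw [if_pos (by simpa using (PySem.Int.mod_eq_zero_iff_dvd m d).2 hdm)]
            by_cases h3 : (d * d == m) = true
            · rw [if_pos h3]
              simp [List.flatMap]
              omega
            · rw [if_neg h3]
              simp [List.flatMap]
              omega
          · by_cases hc2 : ((Int.natAbs s : Int)) * d = m
            · left
              have hdm : d ∣ m := ⟨((Int.natAbs s : Int)), by rw [← hc2, mul_comm]⟩
              rw [if_pos (by simpa using (PySem.Int.mod_eq_zero_iff_dvd m d).2 hdm)]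
              have hq : PySem.Int.floordiv m d = ((Int.natAbs s : Int)) := by
                rw [PySem.Int.floordiv_eq_ediv_of_pos (by omega), ← hc2]
                exact Int.mul_ediv_cancel _ (by omega)
              have h3 : (d * d == m) = false := by
                simp only [beq_eq_false_iff_ne, ne_eq]
                intro hdd
                have : ((Int.natAbs s : Int)) = d := by nlinarith
                exact hc1 this
              rw [if_neg (by simp [h3])]
              simp [List.flatMap]
              omega
            · right
              have hlt : ((Int.natAbs s : Int)) * d < m := lt_of_le_of_ne hle hc2
              have hkd : d < kq := by nlinarith [hlt, ha1]
              refine ⟨hs0, hdvd, by omega, by nlinarith [hkd, hkq, ha1]⟩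
      · rw [dif_neg h]
        simp only [List.not_mem_nil, false_iff, not_and]
        intro hs0 hdvd hge hle
        have h' : m < d * d := lt_of_not_ge h
        nlinarith
  exact fun d => H ((m + 1 - d).toNat) d rfl

theorem pvVisit_nodup (m : Int) : ∀ (d : Int), 1 ≤ d → (pvVisit m d).Nodup := by
  have H : ∀ (k : Nat) (d : Int), (m + 1 - d).toNat = k → 1 ≤ d → (pvVisit m d).Nodup := by
    intro k
    induction k using Nat.strong_induction_on with
    | _ k ih =>
      intro d hk hd1
      rw [pvVisit]
      by_cases h : d * d ≤ m
      · rw [dif_pos h]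
        have h2 : 0 ≤ (d - 1) * d := mul_nonneg (by omega) (by omega)
        have hd : d ≤ m := by nlinarith
        refine List.Nodup.append ?_ (ih ((m + 1 - (d + 1)).toNat) (by omega) (d + 1) rfl (by omega)) ?_
        · by_cases hm : (PySem.Int.mod m d == 0) = true
          · rw [if_pos hm]
            have hdm : d ∣ m := (PySem.Int.mod_eq_zero_iff_dvd m d).1 (by simpa using hm)
            have hq : PySem.Int.floordiv m d * d = m := by
              rw [PySem.Int.floordiv_eq_ediv_of_pos (by omega)]
              exact Int.ediv_mul_cancel hdm
            have hdq : d ≤ PySem.Int.floordiv m d := by nlinarith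
            by_cases h3 : (d * d == m) = true
            · rw [if_pos h3]
              simp [List.flatMap]
              omega
            · rw [if_neg h3]
              have hne : d * d ≠ m := by simpa using h3
              have hqd : PySem.Int.floordiv m d ≠ d := by
                intro he
                rw [he] at hq
                exact hne hq
              simp [List.flatMap]
              omega
          · rw [if_neg hm]
            simp
        · intro x hx hx'
          obtain ⟨hx0, hxdvd, hxge, hxle⟩ := (pvVisit_mem m (d + 1) (by omega) x).1 hx'
          by_cases hm : (PySem.Int.mod m d == 0) = true
          · rw [if_pos hm] at hx
            have hdm : d ∣ m := (PySem.Int.mod_eq_zero_iff_dvd m d).1 (by simpa using hm)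
            have hq : PySem.Int.floordiv m d * d = m := by
              rw [PySem.Int.floordiv_eq_ediv_of_pos (by omega)]
              exact Int.ediv_mul_cancel hdm
            have hdq : d ≤ PySem.Int.floordiv m d := by nlinarith
            by_cases h3 : (d * d == m) = true
            · rw [if_pos h3] at hx
              simp [List.flatMap] at hx
              rcases hx with hx | hx <;> omega
            · rw [if_neg h3] at hx
              simp [List.flatMap] at hx
              rcases hx with hx | hx | hx | hx
              · omega
              · omega
              · have haq : ((Int.natAbs x : Int)) = PySem.Int.floordiv m d := by omega
                rw [haq] at hxle
                nlinarith
              · have haq : ((Int.natAbs x : Int)) = PySem.Int.floordiv m d := by omega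
                rw [haq] at hxle
                nlinarith
          · rw [if_neg hm] at hx
            simp at hx
      · rw [dif_neg h]
        exact List.nodup_nil
  exact fun d => H ((m + 1 - d).toNat) d rfl

-- Sums over two nodup lists with the same members agree.
theorem pv_sum_nodup_congr (V W : List Int) (f : Int -> Int)
    (hV : V.Nodup) (hW : W.Nodup) (h : ∀ x, x ∈ V ↔ x ∈ W) :
    (V.map f).sum = (W.map f).sum := by
  classical
  rw [<- List.sum_toFinset _ hV, <- List.sum_toFinset _ hW]
  congr 1
  ext a
  simp [List.mem_toFinset, h]

-- The trial-division loop computes exactly the grouped count and worth of u's free items.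
theorem pv_free_eq (xs cs : List Int) (u : Int) (hu : u ≠ 0) (hz : ∀ x ∈ xs, x ≠ 0) :
    pvDivLoop (PySem.Dict.counter xs)
        ((xs.zip cs).foldl (fun d p => d.insert p.1 p.2) PySem.Dict.empty)
        u (if u < 0 then -u else u) 1 (0, 0)
      = (pvCnt xs u, pvWorth xs cs u) := by
  set L := (xs.zip cs).foldl (fun d p => d.insert p.1 p.2) PySem.Dict.empty with hLdef
  set m := if u < 0 then -u else u with hmdef
  have hm0 : 0 < m := by rw [hmdef]; split <;> omega
  have hdvd_iff : ∀ x : Int, (x ∣ m ↔ x ∣ u) := by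
    intro x
    rw [hmdef]
    split
    · exact Int.dvd_neg
    · exact Iff.rfl
  rw [pvDivLoop_eq_foldl]
  have e1 : ∀ (cw : Int × Int), ∀ s ∈ pvVisit m 1,
      pvInner (PySem.Dict.counter xs) L u cw s
        = ((if (s != u && (PySem.Dict.counter xs).contains s) then
              cw.1 + (PySem.Dict.counter xs).getD s 0 else cw.1),
           (if (s != u && (PySem.Dict.counter xs).contains s) then
              cw.2 + (PySem.Dict.counter xs).getD s 0 * L.getD s 0 else cw.2)) := by
    intro cw s _
    by_cases hp : (s != u && (PySem.Dict.counter xs).contains s) = true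
    · simp [pvInner, hp]
    · simp [pvInner, hp]
  rw [PySem.List.foldl_congr_mem _ _ _ _ e1]
  rw [PySem.List.foldl_prod_mk
      (f := fun a s => if (s != u && (PySem.Dict.counter xs).contains s) then
        a + (PySem.Dict.counter xs).getD s 0 else a)
      (g := fun a s => if (s != u && (PySem.Dict.counter xs).contains s) then
        a + (PySem.Dict.counter xs).getD s 0 * L.getD s 0 else a)]
  rw [PySem.List.foldl_if_eq_foldl_filter, PySem.List.foldl_if_eq_foldl_filter,
      PySem.List.foldl_add, PySem.List.foldl_add]
  simp only [zero_add]
  have hmm : ∀ x : Int,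
      (x ∈ (pvVisit m 1).filter (fun s => s != u && (PySem.Dict.counter xs).contains s)
        ↔ x ∈ (PySem.Set.ofList xs).filter (fun d => PySem.Int.mod u d == 0 && d != u)) := by
    intro x
    simp only [List.mem_filter, pvVisit_mem m 1 (by omega) x, PySem.Set.mem_ofList,
      PySem.Dict.contains_counter, Bool.and_eq_true, bne_iff_ne, ne_eq, beq_iff_eq,
      List.contains_iff_mem, mul_one]
    constructor
    · rintro ⟨⟨hx0, hxdvd, hge, hle⟩, hxu, hxs⟩
      exact ⟨hxs, (PySem.Int.mod_eq_zero_iff_dvd u x).2 ((hdvd_iff x).1 hxdvd), hxu⟩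
    · rintro ⟨hxs, hxmod, hxu⟩
      have hx0 : x ≠ 0 := hz x hxs
      have hxdvd : x ∣ m := (hdvd_iff x).2 ((PySem.Int.mod_eq_zero_iff_dvd u x).1 hxmod)
      have hle : ((Int.natAbs x : Int)) ≤ m := Int.le_of_dvd hm0 ((Int.natAbs_dvd).2 hxdvd)
      exact ⟨⟨hx0, hxdvd, by omega, hle⟩, hxu, hxs⟩
  have hndV := (pvVisit_nodup m 1 (by omega)).filter
    (fun s => s != u && (PySem.Dict.counter xs).contains s)
  have hndW := (PySem.Set.nodup_ofList xs).filter
    (fun d => PySem.Int.mod u d == 0 && d != u)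
  unfold pvCnt pvWorth
  refine Prod.ext ?_ ?_
  · show ((((pvVisit m 1).filter _).map (fun s => (PySem.Dict.counter xs).getD s 0)).sum) = _
    rw [show (fun s => (PySem.Dict.counter xs).getD s 0) = (fun s => ((List.count s xs : Nat) : Int))
        from funext (fun s => PySem.Dict.getD_counter xs s)]
    exact pv_sum_nodup_congr _ _ _ hndV hndW hmm
  · show ((((pvVisit m 1).filter _).map
        (fun s => (PySem.Dict.counter xs).getD s 0 * L.getD s 0)).sum) = _
    rw [show (fun s => (PySem.Dict.counter xs).getD s 0 * L.getD s 0)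
        = (fun s => ((List.count s xs : Nat) : Int) * L.getD s 0)
        from funext (fun s => by rw [PySem.Dict.getD_counter])]
    exact pv_sum_nodup_congr _ _ _ hndV hndW hmm

-- B's selection step, with the free-items dict abstracted.
def pvStepB (A : Int) (free : PySem.Dict Int (Int × Int)) (best : Int × Int) (u c : Int) :
    Int × Int :=
  if c ≤ A then
    let q := PySem.Int.floordiv A c
    let cw := free.getD u (0, 0)
    if q * cw.1 > best.1 ∨ (q * cw.1 = best.1 ∧ q * cw.2 > best.2) then (q * cw.1, q * cw.2)
    else best
  else best

set_option maxHeartbeats 1000000 in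
theorem pv_B_eq (N : Int) (ids costs : List Int) (A : Int)
    (h1 : N <= (ids.length : Int)) (h2 : N <= (costs.length : Int))
    (hz : ∀ x ∈ ids.take N.toNat, x ≠ 0) :
    buzz_day_sale_alt N ids costs A = pvSel A (ids.take N.toNat) (costs.take N.toNat) := by
  have hxlen : (ids.take N.toNat).length = N.toNat := by simp; omega
  have hclen : (costs.take N.toNat).length = N.toNat := by simp; omega
  have hfst : ((ids.take N.toNat).zip (costs.take N.toNat)).map Prod.fst = ids.take N.toNat :=
    List.map_fst_zip (by rw [hxlen, hclen])
  have hmaps : (PySem.List.pyRange 0 N).foldl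
      (fun (st : PySem.Dict Int Int × PySem.Dict Int Int) i =>
        (st.1.insert (PySem.List.pyGetD ids i 0) (st.1.getD (PySem.List.pyGetD ids i 0) 0 + 1),
         st.2.insert (PySem.List.pyGetD ids i 0) (PySem.List.pyGetD costs i 0)))
      (PySem.Dict.empty, PySem.Dict.empty)
      = (PySem.Dict.counter (ids.take N.toNat),
         ((ids.take N.toNat).zip (costs.take N.toNat)).foldl
           (fun d p => d.insert p.1 p.2) PySem.Dict.empty) := by
    refine Eq.trans (pv_foldl_range_zip ids costs N h1 h2
      (fun (st : PySem.Dict Int Int × PySem.Dict Int Int) u c =>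
        (st.1.insert u (st.1.getD u 0 + 1), st.2.insert u c))
      (PySem.Dict.empty, PySem.Dict.empty)) ?_
    refine Eq.trans (PySem.List.foldl_prod_mk
      (f := fun (d : PySem.Dict Int Int) (p : Int × Int) => d.insert p.1 (d.getD p.1 0 + 1))
      (g := fun (d : PySem.Dict Int Int) (p : Int × Int) => d.insert p.1 p.2)
      _ PySem.Dict.empty PySem.Dict.empty) ?_
    refine Prod.ext ?_ rfl
    refine Eq.trans (List.foldl_map (f := Prod.fst)
      (g := fun (d : PySem.Dict Int Int) x => d.insert x (d.getD x 0 + 1))).symm ?_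
    rw [hfst]
    exact PySem.Dict.foldl_insert_getD_add_one_eq_counter (ids.take N.toNat)
  refine Eq.trans (pv_foldl_range_zip ids costs N h1 h2
    (pvStepB A
      (((PySem.List.pyRange 0 N).foldl
          (fun (st : PySem.Dict Int Int × PySem.Dict Int Int) i =>
            (st.1.insert (PySem.List.pyGetD ids i 0) (st.1.getD (PySem.List.pyGetD ids i 0) 0 + 1),
             st.2.insert (PySem.List.pyGetD ids i 0) (PySem.List.pyGetD costs i 0)))
          (PySem.Dict.empty, PySem.Dict.empty)).1.keys.foldl
        (fun f u => f.insert u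
          (pvDivLoop
            ((PySem.List.pyRange 0 N).foldl
              (fun (st : PySem.Dict Int Int × PySem.Dict Int Int) i =>
                (st.1.insert (PySem.List.pyGetD ids i 0)
                  (st.1.getD (PySem.List.pyGetD ids i 0) 0 + 1),
                 st.2.insert (PySem.List.pyGetD ids i 0) (PySem.List.pyGetD costs i 0)))
              (PySem.Dict.empty, PySem.Dict.empty)).1
            ((PySem.List.pyRange 0 N).foldl
              (fun (st : PySem.Dict Int Int × PySem.Dict Int Int) i =>
                (st.1.insert (PySem.List.pyGetD ids i 0)
                  (st.1.getD (PySem.List.pyGetD ids i 0) 0 + 1),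
                 st.2.insert (PySem.List.pyGetD ids i 0) (PySem.List.pyGetD costs i 0)))
              (PySem.Dict.empty, PySem.Dict.empty)).2
            u (if u < 0 then -u else u) 1 (0, 0)))
        PySem.Dict.empty))
    (0, 0)) ?_
  rw [hmaps]
  unfold pvSel
  refine PySem.List.foldl_congr_mem _ _ _ _ ?_
  intro st p hp
  have hu : p.1 ∈ ids.take N.toNat :=
    (List.of_mem_zip (show (p.1, p.2) ∈ (ids.take N.toNat).zip (costs.take N.toNat) from
      by simpa using hp)).1
  simp only [pvStepB]
  rw [PySem.Dict.keys_counter]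
  rw [pv_getD_foldl_insert_key
    (fun u => pvDivLoop (PySem.Dict.counter (ids.take N.toNat))
      (((ids.take N.toNat).zip (costs.take N.toNat)).foldl
        (fun d p => d.insert p.1 p.2) PySem.Dict.empty)
      u (if u < 0 then -u else u) 1 (0, 0))]
  rw [if_pos ((PySem.Set.mem_ofList (ids.take N.toNat) p.1).2 hu)]
  rw [pv_free_eq (ids.take N.toNat) (costs.take N.toNat) p.1 (hz p.1 hu) hz]

-- ===== VERDICT (by name: the statement is the Claim_ definition above) =====
theorem buzz_day_sale_spec : Claim_equal_buzz_day_sale := by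
  intro N ids costs A _ hpre
  obtain ⟨h1, h2, hz, -⟩ := hpre
  unfold Spec_buzz_day_sale
  exact (pv_A_eq N ids costs A h1 h2).trans (pv_B_eq N ids costs A h1 h2 hz).symm
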